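-- pv_equiv track=rewrite | github.com/mekkablue/Glyphs-Scripts | Spacing/Metrics Key Manager.py | parseGlyphNames
-- ===== SOURCE A (Python) =====
-- def parseGlyphNames(glyphNameText):
-- 	possibleChars = "ABCDEFGHIJKLMNOPQRSTUVWXYZabcdefghijklmnopqrstuvwxyz0123456789.-_"
-- 	glyphNames = []
-- 	currName = ""
-- 	for currChar in glyphNameText.strip() + " ":
-- 		if currChar in possibleChars:
-- 			currName += currChar
-- 		else:
-- 			if currName:
-- 				glyphNames.append(currName)
-- 				currName = ""
-- 	return glyphNames
-- ===== SOURCE B (Python) =====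
-- import re
--
-- def parseGlyphNames(glyphNameText):
-- 	return re.findall(r"[A-Za-z0-9._-]+", glyphNameText.strip())
-- ===== Notes on version B (the rewrite author's own statement) =====
-- stated objective: idiomatic
-- what changed: Replaced the explicit character-by-character accumulator state machine (with its trailing-space flush sentinel) by a single regex tokenization re.findall(r'[A-Za-z0-9._-]+', text.strip()); the C regex engine gives a constant-factor speedup.
import Mathlib
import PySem

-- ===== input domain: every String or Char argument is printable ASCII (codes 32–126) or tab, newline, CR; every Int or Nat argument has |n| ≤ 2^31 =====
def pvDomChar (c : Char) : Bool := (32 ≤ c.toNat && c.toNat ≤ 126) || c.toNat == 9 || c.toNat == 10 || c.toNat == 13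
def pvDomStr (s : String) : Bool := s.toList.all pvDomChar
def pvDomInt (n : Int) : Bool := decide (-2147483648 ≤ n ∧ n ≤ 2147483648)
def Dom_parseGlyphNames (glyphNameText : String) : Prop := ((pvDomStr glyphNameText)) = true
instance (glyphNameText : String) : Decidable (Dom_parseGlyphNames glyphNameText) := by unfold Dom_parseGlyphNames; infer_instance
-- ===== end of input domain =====

-- B replaces A's character-by-character accumulator state machine by regex-style maximal-run
-- tokenization (re.findall of the character class) on the stripped text; idiomatic, same cost.


-- ===== PORT A =====
-- literal transliteration of A: fold the state machine (glyphNames, currName) over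
-- strip(glyphNameText) + " "; membership test 'currChar in possibleChars'.
def pvStepA (st : List String × String) (currChar : Char) : List String × String :=
  if ("ABCDEFGHIJKLMNOPQRSTUVWXYZabcdefghijklmnopqrstuvwxyz0123456789.-_".toList).contains currChar then
    (st.1, st.2.push currChar)
  else
    if st.2 ≠ "" then (st.1 ++ [st.2], "") else st

def parseGlyphNames (glyphNameText : String) : List String :=
  ((PySem.Str.strip glyphNameText ++ " ").toList.foldl pvStepA ([], "")).1

-- ===== PORT B =====
-- port of Source B's regex findall r"[A-Za-z0-9._-]+": the character class as range/literal tests,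
-- '+' as maximal runs extracted with takeWhile/dropWhile; applied to the stripped text.
def pvClassB (c : Char) : Bool :=
  ('A' ≤ c && c ≤ 'Z') || ('a' ≤ c && c ≤ 'z') || ('0' ≤ c && c ≤ '9') ||
  c == '.' || c == '_' || c == '-'

def pvFindAllB : List Char → List String
  | [] => []
  | c :: cs =>
    if pvClassB c then
      String.ofList ((c :: cs).takeWhile pvClassB) :: pvFindAllB ((c :: cs).dropWhile pvClassB)
    else
      pvFindAllB cs
termination_by l => l.length
decreasing_by
  · rename_i h
    rw [List.dropWhile_cons_of_pos h]
    exact Nat.lt_succ_of_le (List.length_dropWhile_le pvClassB cs)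
  · simp

def parseGlyphNames_alt (glyphNameText : String) : List String :=
  pvFindAllB (PySem.Str.strip glyphNameText).toList

-- ===== PRECONDITION & SPEC =====
def Spec_parseGlyphNames (glyphNameText : String) (out : List String) : Prop := out = parseGlyphNames_alt glyphNameText
instance (glyphNameText : String) (out : List String) : Decidable (Spec_parseGlyphNames glyphNameText out) := by unfold Spec_parseGlyphNames; infer_instance

-- ===== CLAIM (what is proved, stated in full; the proofs are below) =====
def Claim_equal_parseGlyphNames : Prop := ∀ (glyphNameText : String), Dom_parseGlyphNames glyphNameText → Spec_parseGlyphNames glyphNameText (parseGlyphNames glyphNameText)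

-- ===== LEMMAS AND PROOFS =====

theorem pv_toList_ne (curr : String) (h : ¬ curr = "") : curr.toList ≠ [] := by
  intro hl
  exact h (String.toList_inj.mp (by simp [hl]))

-- A's membership test and B's character class agree on every Char.
theorem pvClass_eq (c : Char) :
    ("ABCDEFGHIJKLMNOPQRSTUVWXYZabcdefghijklmnopqrstuvwxyz0123456789.-_".toList).contains c
      = pvClassB c := by
  have hl : "ABCDEFGHIJKLMNOPQRSTUVWXYZabcdefghijklmnopqrstuvwxyz0123456789.-_".toList = ['A', 'B', 'C', 'D', 'E', 'F', 'G', 'H', 'I', 'J', 'K', 'L', 'M', 'N', 'O', 'P', 'Q', 'R', 'S', 'T', 'U', 'V', 'W', 'X', 'Y', 'Z', 'a', 'b', 'c', 'd', 'e', 'f', 'g', 'h', 'i', 'j', 'k', 'l', 'm', 'n', 'o', 'p', 'q', 'r', 's', 't', 'u', 'v', 'w', 'x', 'y', 'z', '0', '1', '2', '3', '4', '5', '6', '7', '8', '9', '.', '-', '_'] := rfl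
  have hc : ∀ d : Char, (c = d) ↔ (c.toNat = d.toNat) := fun d =>
    ⟨fun h => by rw [h], fun h => Char.ext (UInt32.toNat_inj.mp h)⟩
  have hle : ∀ d : Char, (d ≤ c) ↔ (d.toNat ≤ c.toNat) := fun d => by
    simp [Char.le_def, UInt32.le_iff_toNat_le]
  have hle' : ∀ d : Char, (c ≤ d) ↔ (c.toNat ≤ d.toNat) := fun d => by
    simp [Char.le_def, UInt32.le_iff_toNat_le]
  rw [hl, Bool.eq_iff_iff]
  simp only [pvClassB, List.contains_eq_mem, decide_eq_true_eq, List.mem_cons, List.not_mem_nil,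
    or_false, Bool.or_eq_true, Bool.and_eq_true, beq_iff_eq]
  simp only [hc, hle, hle', show (('A' : Char).toNat = 65) from rfl, show (('B' : Char).toNat = 66) from rfl, show (('C' : Char).toNat = 67) from rfl, show (('D' : Char).toNat = 68) from rfl, show (('E' : Char).toNat = 69) from rfl, show (('F' : Char).toNat = 70) from rfl, show (('G' : Char).toNat = 71) from rfl, show (('H' : Char).toNat = 72) from rfl, show (('I' : Char).toNat = 73) from rfl, show (('J' : Char).toNat = 74) from rfl, show (('K' : Char).toNat = 75) from rfl, show (('L' : Char).toNat = 76) from rfl, show (('M' : Char).toNat = 77) from rfl, show (('N' : Char).toNat = 78) from rfl, show (('O' : Char).toNat = 79) from rfl, show (('P' : Char).toNat = 80) from rfl, show (('Q' : Char).toNat = 81) from rfl, show (('R' : Char).toNat = 82) from rfl, show (('S' : Char).toNat = 83) from rfl, show (('T' : Char).toNat = 84) from rfl, show (('U' : Char).toNat = 85) from rfl, show (('V' : Char).toNat = 86) from rfl, show (('W' : Char).toNat = 87) from rfl, show (('X' : Char).toNat = 88) from rfl, show (('Y' : Char).toNat = 89) from rfl, show (('Z' : Char).toNat = 90) from rfl,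 show (('a' : Char).toNat = 97) from rfl, show (('b' : Char).toNat = 98) from rfl, show (('c' : Char).toNat = 99) from rfl, show (('d' : Char).toNat = 100) from rfl, show (('e' : Char).toNat = 101) from rfl, show (('f' : Char).toNat = 102) from rfl, show (('g' : Char).toNat = 103) from rfl, show (('h' : Char).toNat = 104) from rfl, show (('i' : Char).toNat = 105) from rfl, show (('j' : Char).toNat = 106) from rfl, show (('k' : Char).toNat = 107) from rfl, show (('l' : Char).toNat = 108) from rfl, show (('m' : Char).toNat = 109) from rfl, show (('n' : Char).toNat = 110) from rfl, show (('o' : Char).toNat = 111) from rfl, show (('p' : Char).toNat = 112) from rfl, show (('q' : Char).toNat = 113) from rfl, show (('r' : Char).toNat = 114) from rfl, show (('s' : Char).toNat = 115) from rfl, show (('t' : Char).toNat = 116) from rfl, show (('u' : Char).toNat = 117) from rfl, show (('v' : Char).toNat = 118) from rfl, show (('w' : Char).toNat = 119) from rfl, show (('x' : Char).toNat = 120) from rfl, show (('y' : Char).toNat = 121) from rfl, show (('z' : Char).toNat = 122) from rfl, show (('0' : Char).toNat = 48) from rfl, show (('1' : Char).toNat = 49) from rfl, show (('2' : Char).toNat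 = 50) from rfl, show (('3' : Char).toNat = 51) from rfl, show (('4' : Char).toNat = 52) from rfl, show (('5' : Char).toNat = 53) from rfl, show (('6' : Char).toNat = 54) from rfl, show (('7' : Char).toNat = 55) from rfl, show (('8' : Char).toNat = 56) from rfl, show (('9' : Char).toNat = 57) from rfl, show (('.' : Char).toNat = 46) from rfl, show (('-' : Char).toNat = 45) from rfl, show (('_' : Char).toNat = 95) from rfl]
  omega

theorem pvClassB_space : pvClassB ' ' = false := by decide

-- takeWhile/dropWhile through an all-true prefix followed by a false char.
theorem pv_takeWhile_pre (p : List Char) (c : Char) (rest : List Char)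
    (hall : ∀ x ∈ p, pvClassB x = true) (hc : pvClassB c = false) :
    (p ++ c :: rest).takeWhile pvClassB = p ∧ (p ++ c :: rest).dropWhile pvClassB = c :: rest := by
  induction p with
  | nil => simp [List.takeWhile, List.dropWhile, hc]
  | cons a as ih =>
    have ha : pvClassB a = true := hall a (by simp)
    have h2 := ih (fun x hx => hall x (by simp [hx]))
    simp [List.takeWhile, List.dropWhile, ha, h2.1, h2.2]

-- runs of a nonempty all-allowed list
theorem pvFindAllB_all (p : List Char) (hne : p ≠ []) (hall : ∀ x ∈ p, pvClassB x = true) :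
    pvFindAllB p = [String.ofList p] := by
  match p with
  | [] => exact absurd rfl hne
  | c :: cs =>
    have hc : pvClassB c = true := hall c (by simp)
    have h1 : (c :: cs).takeWhile pvClassB = c :: cs := by
      rw [List.takeWhile_eq_self_iff]; intro x hx; exact hall x hx
    have h2 : (c :: cs).dropWhile pvClassB = [] := by
      rw [List.dropWhile_eq_nil_iff]; intro x hx; exact hall x hx
    rw [pvFindAllB.eq_def]
    simp [hc, h1, h2, pvFindAllB]

theorem pvFindAllB_skip (c : Char) (cs : List Char) (hc : pvClassB c = false) :
    pvFindAllB (c :: cs) = pvFindAllB cs := by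
  rw [pvFindAllB.eq_def]
  simp [hc]

theorem pvFindAllB_pre (p : List Char) (c : Char) (rest : List Char)
    (hne : p ≠ []) (hall : ∀ x ∈ p, pvClassB x = true) (hc : pvClassB c = false) :
    pvFindAllB (p ++ c :: rest) = String.ofList p :: pvFindAllB rest := by
  match p with
  | [] => exact absurd rfl hne
  | a :: as =>
    have ha : pvClassB a = true := hall a (by simp)
    have htw := pv_takeWhile_pre (a :: as) c rest hall hc
    rw [show (a :: as) ++ c :: rest = a :: (as ++ c :: rest) by simp] at htw ⊢
    rw [pvFindAllB.eq_def]
    simp only [ha, if_pos, htw.1, htw.2]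
    rw [pvFindAllB_skip c rest hc]

-- the loop invariant: folding A's state machine over l ++ [' '] from (acc, curr)
-- (curr made of allowed chars) yields acc ++ runs of (curr ++ l).
theorem pv_loop (l : List Char) (acc : List String) (curr : String)
    (hcurr : ∀ x ∈ curr.toList, pvClassB x = true) :
    ((l ++ [' ']).foldl pvStepA (acc, curr)).1 = acc ++ pvFindAllB (curr.toList ++ l) := by
  induction l generalizing acc curr with
  | nil =>
    simp only [List.nil_append, List.foldl_cons, List.foldl_nil, List.append_nil]
    rw [pvStepA, if_neg (by rw [pvClass_eq]; simp [pvClassB_space])]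
    by_cases h : curr = ""
    · subst h
      simp [pvFindAllB]
    · rw [if_pos (by simpa using h)]
      rw [pvFindAllB_all curr.toList (pv_toList_ne curr h) hcurr]
      simp
  | cons c cs ih =>
    simp only [List.cons_append, List.foldl_cons]
    rw [pvStepA]
    by_cases hc : pvClassB c = true
    · rw [if_pos (by rw [pvClass_eq]; exact hc)]
      have h2 := ih acc (curr.push c) (by
        intro x hx
        simp only [String.toList_push, List.mem_append, List.mem_singleton] at hx
        rcases hx with hx | hx
        · exact hcurr x hx
        · subst hx; exact hc)
      rw [h2]
      simp [String.toList_push]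
    · rw [if_neg (by rw [pvClass_eq]; simpa using hc)]
      have hc' : pvClassB c = false := by simpa using hc
      by_cases h : curr = ""
      · subst h
        rw [if_neg (by simp)]
        rw [ih acc "" (by simp)]
        simp [pvFindAllB_skip c cs hc']
      · rw [if_pos (by simpa using h)]
        rw [ih (acc ++ [curr]) "" (by simp)]
        rw [pvFindAllB_pre curr.toList c cs (pv_toList_ne curr h) hcurr hc']
        simp

-- ===== VERDICT (by name: the statement is the Claim_ definition above) =====
theorem parseGlyphNames_spec : Claim_equal_parseGlyphNames := by
  intro t _
  show parseGlyphNames t = parseGlyphNames_alt t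
  unfold parseGlyphNames parseGlyphNames_alt
  rw [String.toList_append]
  have h := pv_loop (PySem.Str.strip t).toList [] "" (by simp)
  simpa using h
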